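-- pv_equiv track=rewrite | github.com/kunaldeo/single-file-project-dumper | project_dumper/features.py | suggest_related_files
-- ===== SOURCE A (Python) =====
-- from typing import Dict, List, Optional, Set
--
-- def suggest_related_files(root_dir: str, selected_files: Dict[str, bool]) -> List[str]:
--     """Suggest related files that might be worth including."""
--     suggestions = []
--     selected_set = set(f for f, s in selected_files.items() if s)
--
--     # Common patterns to look for
--     patterns = {
--         "test": ["test_", "_test", ".test.", "tests/"],
--         "config": ["config", "settings", ".env", ".ini", ".yaml", ".yml"],
--         "docs": ["README", "CHANGELOG", "LICENSE", "docs/", ".md"],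
--         "interface": [".proto", ".graphql", ".swagger", "api/"],
--         "ci": [".github/", ".gitlab", "Jenkinsfile", ".travis"],
--     }
--
--     for category, keywords in patterns.items():
--         category_files = []
--
--         for file_path in selected_files:
--             if file_path in selected_set:
--                 continue
--
--             file_lower = file_path.lower()
--             if any(kw in file_lower for kw in keywords):
--                 category_files.append(file_path)
--
--         if category_files:
--             suggestions.extend(category_files[:3])  # Max 3 per category
--
--     return suggestions[:10]  # Return max 10 suggestions
-- ===== SOURCE B (Python) =====
-- def suggest_related_files(root_dir: str, selected_files) -> list:
--     """Suggest related files: tag matches as (category_index, file) pairs in one pass,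
--     stable-sort by category index, then emit with per-category (3) and global (10) caps."""
--     patterns = [
--         ["test_", "_test", ".test.", "tests/"],
--         ["config", "settings", ".env", ".ini", ".yaml", ".yml"],
--         ["README", "CHANGELOG", "LICENSE", "docs/", ".md"],
--         [".proto", ".graphql", ".swagger", "api/"],
--         [".github/", ".gitlab", "Jenkinsfile", ".travis"],
--     ]
--     pairs = []
--     for file_path, is_selected in selected_files.items():
--         if is_selected:
--             continue
--         file_lower = file_path.lower()
--         for ci, keywords in enumerate(patterns):
--             if any(kw in file_lower for kw in keywords):
--                 pairs.append((ci, file_path))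
--     pairs.sort(key=lambda p: p[0])  # stable: file order kept inside each category
--     out = []
--     counts = [0] * len(patterns)
--     for ci, file_path in pairs:
--         if len(out) >= 10:
--             break
--         if counts[ci] < 3:
--             counts[ci] += 1
--             out.append(file_path)
--     return out
-- ===== Notes on version B (the rewrite author's own statement) =====
-- stated objective: alternative
-- what changed: B replaces A's five category-wise rescans of the file list with a tag-sort-scan pipeline: one pass tags every match as a (category_index, file) pair, a stable sort by category index groups the pairs, and a single final scan with per-category counters (3 each) and a global cap (10) emits the result; not measurably faster, so claimed as alternative.
import Mathlib
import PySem

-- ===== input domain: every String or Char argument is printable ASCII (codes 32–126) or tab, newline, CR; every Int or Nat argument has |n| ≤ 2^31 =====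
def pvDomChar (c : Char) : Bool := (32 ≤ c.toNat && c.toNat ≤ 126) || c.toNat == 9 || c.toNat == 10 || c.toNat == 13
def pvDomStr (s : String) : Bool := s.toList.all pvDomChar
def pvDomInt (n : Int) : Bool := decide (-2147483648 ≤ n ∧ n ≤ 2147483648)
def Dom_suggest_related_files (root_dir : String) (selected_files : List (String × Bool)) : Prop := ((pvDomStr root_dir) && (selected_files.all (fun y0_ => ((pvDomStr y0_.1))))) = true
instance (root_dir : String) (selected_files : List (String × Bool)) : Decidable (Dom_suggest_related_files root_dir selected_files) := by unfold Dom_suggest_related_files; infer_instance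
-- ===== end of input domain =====

-- B tags each match as a (category_index, file) pair in ONE pass, stable-sorts the pairs by
-- category index, and emits them with per-category (3) and global (10) counters, instead of
-- A's five category-wise rescans of the file list; same return value.

-- ===== PORT A =====
def sfA_patterns : List (String × List String) :=
  [("test", ["test_", "_test", ".test.", "tests/"]),
   ("config", ["config", "settings", ".env", ".ini", ".yaml", ".yml"]),
   ("docs", ["README", "CHANGELOG", "LICENSE", "docs/", ".md"]),
   ("interface", [".proto", ".graphql", ".swagger", "api/"]),
   ("ci", [".github/", ".gitlab", "Jenkinsfile", ".travis"])]

def suggest_related_files (root_dir : String) (selected_files : List (String × Bool)) : List String :=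
  let d := PySem.Dict.ofList selected_files
  let selected_set : PySem.Set String :=
    PySem.Set.ofList ((d.items.filter (fun p => p.2)).map (fun p => p.1))
  let suggestions :=
    sfA_patterns.foldl (fun suggestions ckw =>
      let category_files :=
        d.keys.foldl (fun acc file_path =>
          if PySem.Set.contains selected_set file_path then acc
          else
            let file_lower := PySem.Str.lower file_path
            if ckw.2.any (fun kw => PySem.Str.isIn kw file_lower) then acc ++ [file_path]
            else acc) []
      if category_files ≠ [] then suggestions ++ PySem.List.slice category_files none (some 3)
      else suggestions) []
  PySem.List.slice suggestions none (some 10)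

-- ===== PORT B =====
def sfB_patterns : List (List String) :=
  [["test_", "_test", ".test.", "tests/"],
   ["config", "settings", ".env", ".ini", ".yaml", ".yml"],
   ["README", "CHANGELOG", "LICENSE", "docs/", ".md"],
   [".proto", ".graphql", ".swagger", "api/"],
   [".github/", ".gitlab", "Jenkinsfile", ".travis"]]

/-- the final loop of Source B: walk the sorted pairs, appending while the per-category
counter is below 3, breaking once the output holds 10 entries. -/
def sfB_emit : List (Int × String) → List Int → List String → List String
  | [], _, out => out
  | p :: rest, counts, out =>
    if 10 ≤ out.length then out
    else if PySem.List.pyGetD counts p.1 0 < 3 then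
      sfB_emit rest (PySem.List.pySetD counts p.1 (PySem.List.pyGetD counts p.1 0 + 1)) (out ++ [p.2])
    else sfB_emit rest counts out

def suggest_related_files_alt (root_dir : String) (selected_files : List (String × Bool)) : List String :=
  let d := PySem.Dict.ofList selected_files
  let pairs :=
    d.items.foldl (fun pairs fs =>
      if fs.2 then pairs
      else
        let file_lower := PySem.Str.lower fs.1
        (PySem.List.enumerate sfB_patterns).foldl (fun pairs ck =>
          if ck.2.any (fun kw => PySem.Str.isIn kw file_lower) then pairs ++ [(ck.1, fs.1)]
          else pairs) pairs) []
  let sorted_pairs := PySem.List.sorted pairs (fun p => p.1)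
  sfB_emit sorted_pairs (PySem.List.pyRepeat [0] (sfB_patterns.length : Int)) []

-- ===== PRECONDITION & SPEC =====
def Spec_suggest_related_files (root_dir : String) (selected_files : List (String × Bool)) (out : List String) : Prop := out = suggest_related_files_alt root_dir selected_files
instance (root_dir : String) (selected_files : List (String × Bool)) (out : List String) : Decidable (Spec_suggest_related_files root_dir selected_files out) := by unfold Spec_suggest_related_files; infer_instance

-- ===== CLAIM (what is proved, stated in full; the proofs are below) =====
def Claim_equal_suggest_related_files : Prop := ∀ (root_dir : String) (selected_files : List (String × Bool)), Dom_suggest_related_files root_dir selected_files → Spec_suggest_related_files root_dir selected_files (suggest_related_files root_dir selected_files)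

-- ===== LEMMAS AND PROOFS =====

/-- does file `f` (lower-cased) contain one of the keywords? -/
def sfMatch (kws : List String) (f : String) : Bool :=
  kws.any (fun kw => PySem.Str.isIn kw (PySem.Str.lower f))

/-- the files of `L` that are not selected and match `kws`, in order. -/
def sfCat (L : List (String × Bool)) (kws : List String) : List String :=
  (L.filter (fun fs => !fs.2 && sfMatch kws fs.1)).map (fun fs => fs.1)

/-- the tag list Source B builds for one unselected file. -/
def sfTag (f : String) : List (Int × String) :=
  ((PySem.List.enumerate sfB_patterns).filter (fun ck => sfMatch ck.2 f)).map (fun ck => (ck.1, f))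

/-- all pairs Source B collects. -/
def sfPairs (L : List (String × Bool)) : List (Int × String) :=
  L.flatMap (fun fs => if fs.2 then [] else sfTag fs.1)

theorem sfCat_nil (kws : List String) : sfCat [] kws = [] := rfl

theorem sfCat_cons (fs : String × Bool) (L : List (String × Bool)) (kws : List String) :
    sfCat (fs :: L) kws
      = (if !fs.2 && sfMatch kws fs.1 then [fs.1] else []) ++ sfCat L kws := by
  simp only [sfCat, List.filter_cons]
  split_ifs <;> simp

/-- A's inner scan over the keys with the selected-set test equals `sfCat`. -/
theorem sfA_inner (L : List (String × Bool)) (hnd : (L.map (fun p => p.1)).Nodup)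
    (kws : List String) :
    (L.map (fun p => p.1)).foldl (fun acc file_path =>
        if PySem.Set.contains (PySem.Set.ofList ((L.filter (fun p => p.2)).map (fun p => p.1))) file_path then acc
        else if kws.any (fun kw => PySem.Str.isIn kw (PySem.Str.lower file_path)) then acc ++ [file_path]
        else acc) []
      = sfCat L kws := by
  rw [List.foldl_map]
  rw [PySem.List.foldl_congr_mem
    (g := fun acc fs => if !fs.2 && sfMatch kws fs.1 then acc ++ [fs.1] else acc)]
  · rw [PySem.List.foldl_append_if]
    rfl
  · intro acc fs hfs
    have hsel : PySem.Set.contains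
        (PySem.Set.ofList ((L.filter (fun p => p.2)).map (fun p => p.1))) fs.1 = fs.2 := by
      cases h2 : fs.2 with
      | true =>
        have : fs.1 ∈ (L.filter (fun p => p.2)).map (fun p => p.1) := by
          exact List.mem_map_of_mem (List.mem_filter.2 ⟨hfs, h2⟩)
        simpa [PySem.Set.contains_iff, PySem.Set.mem_ofList] using this
      | false =>
        rw [← Bool.not_eq_true]
        intro hc
        have hmem : fs.1 ∈ (L.filter (fun p => p.2)).map (fun p => p.1) := by
          simpa [PySem.Set.contains_iff, PySem.Set.mem_ofList] using hc
        obtain ⟨q, hq, hq1⟩ := List.mem_map.1 hmem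
        have hqL : q ∈ L := (List.mem_filter.1 hq).1
        have hq2 : q.2 = true := by simpa using (List.mem_filter.1 hq).2
        have : q = fs := List.inj_on_of_nodup_map hnd hqL hfs hq1
        rw [this] at hq2
        exact absurd hq2 (by simp [h2])
    rw [hsel]
    cases h2 : fs.2 <;> simp [sfMatch]

/-- B's pair-building pass produces `sfPairs`. -/
theorem sfB_pairs_eq (L : List (String × Bool)) :
    L.foldl (fun pairs fs =>
        if fs.2 then pairs
        else
          (PySem.List.enumerate sfB_patterns).foldl (fun pairs ck =>
            if ck.2.any (fun kw => PySem.Str.isIn kw (PySem.Str.lower fs.1)) then pairs ++ [(ck.1, fs.1)]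
            else pairs) pairs) []
      = sfPairs L := by
  rw [PySem.List.foldl_congr_mem
    (g := fun pairs fs => pairs ++ (if fs.2 then [] else sfTag fs.1))]
  · rw [PySem.List.foldl_append_eq_flatMap]
    rfl
  · intro acc fs _
    by_cases h2 : fs.2 = true
    · simp [h2]
    · rw [if_neg h2, if_neg h2]
      rw [PySem.List.foldl_append_if
        (p := fun ck : Int × List String => ck.2.any (fun kw => PySem.Str.isIn kw (PySem.Str.lower fs.1)))
        (f := fun ck : Int × List String => (ck.1, fs.1))]
      rfl

/-- inserting an element whose place is between a too-small prefix and a too-large suffix. -/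
theorem sf_insertBy_middle {α : Type} (before : α → α → Bool) (x : α) (A B : List α)
    (hA : ∀ a ∈ A, before x a = false) (hB : ∀ b ∈ B, before x b = true) :
    PySem.List.insertBy before x (A ++ B) = A ++ x :: B := by
  induction A with
  | nil =>
    cases B with
    | nil => rfl
    | cons b B' =>
      simp only [List.nil_append, PySem.List.insertBy]
      rw [if_pos (hB b (by simp))]
  | cons a A' ih =>
    simp only [List.cons_append, PySem.List.insertBy]
    rw [if_neg (by simp [hA a (by simp)])]
    have ih' := ih (fun a ha => hA a (by simp [ha]))
    rw [ih']

theorem sf_flatMap_congr_mem {α β : Type} (l : List α) (f g : α → List β)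
    (h : ∀ x ∈ l, f x = g x) : l.flatMap f = l.flatMap g := by
  induction l with
  | nil => rfl
  | cons x l ih =>
    simp only [List.flatMap_cons]
    rw [h x (by simp), ih (fun y hy => h y (by simp [hy]))]

/-- a stable sort by key groups the list: keys drawn from the strictly increasing list `ks`. -/
theorem sf_sorted_groups (ks : List Int) (hnd : ks.Pairwise (· < ·))
    (P : List (Int × String)) (hmem : ∀ p ∈ P, p.1 ∈ ks) :
    PySem.List.sorted P (fun p => p.1)
      = ks.flatMap (fun k => P.filter (fun p => decide (p.1 = k))) := by
  induction P using List.reverseRecOn with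
  | nil =>
    rw [PySem.List.sorted_eq_foldl_insertBy]
    simp
  | append_singleton M x ih =>
    rw [PySem.List.sorted_eq_foldl_insertBy, List.foldl_append, List.foldl_cons, List.foldl_nil,
        ← PySem.List.sorted_eq_foldl_insertBy,
        ih (fun p hp => hmem p (List.mem_append_left _ hp))]
    obtain ⟨ks1, ks2, rfl⟩ := List.append_of_mem (hmem x (by simp))
    have hp := (List.pairwise_append.1 hnd)
    have h1 : ∀ a ∈ ks1, a < x.1 := fun a ha => hp.2.2 a ha x.1 (by simp)
    have h2 : ∀ b ∈ ks2, x.1 < b := (List.pairwise_cons.1 hp.2.1).1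
    rw [List.flatMap_append, List.flatMap_cons, List.flatMap_append, List.flatMap_cons]
    have hfil : ∀ k : Int, (M ++ [x]).filter (fun p => decide (p.1 = k))
        = M.filter (fun p => decide (p.1 = k)) ++ (if x.1 = k then [x] else []) := by
      intro k
      rw [List.filter_append]
      congr 1
      by_cases h : x.1 = k <;> simp [h]
    have e1 : List.flatMap (fun k => List.filter (fun p => decide (p.1 = k)) (M ++ [x])) ks1
        = List.flatMap (fun k => List.filter (fun p => decide (p.1 = k)) M) ks1 :=
      sf_flatMap_congr_mem _ _ _ (by
        intro k hk
        rw [hfil k, if_neg (by have := h1 k hk; omega), List.append_nil])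
    have e2 : List.flatMap (fun k => List.filter (fun p => decide (p.1 = k)) (M ++ [x])) ks2
        = List.flatMap (fun k => List.filter (fun p => decide (p.1 = k)) M) ks2 :=
      sf_flatMap_congr_mem _ _ _ (by
        intro k hk
        rw [hfil k, if_neg (by have := h2 k hk; omega), List.append_nil])
    rw [e1, e2, hfil x.1, if_pos rfl]
    have hmid := sf_insertBy_middle (fun a b => decide (a.1 < b.1)) x
      (List.flatMap (fun k => List.filter (fun p => decide (p.1 = k)) M) ks1
        ++ List.filter (fun p => decide (p.1 = x.1)) M)
      (List.flatMap (fun k => List.filter (fun p => decide (p.1 = k)) M) ks2)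
      (by
        intro a ha
        simp only [List.mem_append] at ha
        rcases ha with ha | ha
        · obtain ⟨k, hk, haf⟩ := List.mem_flatMap.1 ha
          have : a.1 = k := by simpa using (List.mem_filter.1 haf).2
          have := h1 k hk
          simp; omega
        · have : a.1 = x.1 := by simpa using (List.mem_filter.1 ha).2
          simp; omega)
      (by
        intro b hb
        obtain ⟨k, hk, hbf⟩ := List.mem_flatMap.1 hb
        have : b.1 = k := by simpa using (List.mem_filter.1 hbf).2
        have := h2 k hk
        simp; omega)
    simp only [List.append_assoc, List.singleton_append] at hmid ⊢
    exact hmid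

/-- filtering a file's tag list down to one category index. -/
theorem sf_filter_tag (ks : List (Int × List String)) (hnd : (ks.map (fun p => p.1)).Nodup)
    (k : Int) (kws : List String) (hmem : (k, kws) ∈ ks) (f : String) :
    ((ks.filter (fun ck => sfMatch ck.2 f)).map (fun ck => (ck.1, f))).filter
        (fun p => decide (p.1 = k))
      = if sfMatch kws f then [(k, f)] else [] := by
  induction ks with
  | nil => cases hmem
  | cons hd tl ih =>
    simp only [List.map_cons, List.nodup_cons] at hnd
    rcases List.mem_cons.1 hmem with heq | htl
    · subst heq
      have htl0 : ∀ p ∈ tl.filter (fun ck => sfMatch ck.2 f), ¬ p.1 = k := by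
        intro p hp hpk
        apply hnd.1
        rw [← hpk]
        exact List.mem_map.2 ⟨p, (List.mem_filter.1 hp).1, rfl⟩
      simp only [List.filter_cons]
      by_cases h : sfMatch kws f
      · rw [if_pos (by simpa using h)]
        simp only [List.map_cons, List.filter_cons]
        rw [if_pos (by simp)]
        rw [if_pos h]
        congr 1
        rw [List.filter_eq_nil_iff.2]
        intro p hp
        obtain ⟨q, hq, rfl⟩ := List.mem_map.1 hp
        simpa using htl0 q hq
      · rw [if_neg (by simpa using h), if_neg h]
        rw [List.filter_eq_nil_iff.2]
        intro p hp
        obtain ⟨q, hq, rfl⟩ := List.mem_map.1 hp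
        simpa using htl0 q hq
    · have hne : k ≠ hd.1 := fun h => hnd.1 (h ▸ List.mem_map_of_mem htl)
      simp only [List.filter_cons]
      by_cases h : sfMatch hd.2 f
      · rw [if_pos (by simpa using h)]
        simp only [List.map_cons, List.filter_cons]
        rw [if_neg (by simpa using Ne.symm hne)]
        exact ih hnd.2 htl
      · rw [if_neg (by simpa using h)]
        exact ih hnd.2 htl

/-- per-file tags collapse, category by category, to `sfCat`. -/
theorem sf_filter_pairs (L : List (String × Bool)) (k : Int) (kws : List String)
    (hmem : (k, kws) ∈ PySem.List.enumerate sfB_patterns) :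
    (sfPairs L).filter (fun p => decide (p.1 = k))
      = (sfCat L kws).map (fun f => (k, f)) := by
  have hnd : ((PySem.List.enumerate sfB_patterns).map (fun p => p.1)).Nodup := by decide
  unfold sfPairs
  rw [List.filter_flatMap]
  induction L with
  | nil => simp [sfCat_nil]
  | cons fs L ih =>
    rw [List.flatMap_cons, ih, sfCat_cons, List.map_append]
    congr 1
    by_cases h2 : fs.2 = true
    · simp [h2]
    · rw [if_neg h2]
      unfold sfTag
      rw [sf_filter_tag _ hnd k kws hmem fs.1]
      have h2' : fs.2 = false := by simpa using h2
      by_cases h : sfMatch kws fs.1 <;> simp [h, h2']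

/-- every pair's key is one of the five category indices. -/
theorem sf_pairs_keys (L : List (String × Bool)) :
    ∀ p ∈ sfPairs L, p.1 ∈ ([0, 1, 2, 3, 4] : List Int) := by
  intro p hp
  obtain ⟨fs, _, hfp⟩ := List.mem_flatMap.1 hp
  by_cases h2 : fs.2 = true
  · simp [h2] at hfp
  · rw [if_neg h2] at hfp
    obtain ⟨ck, hck, rfl⟩ := List.mem_map.1 hfp
    have hcke : ck ∈ PySem.List.enumerate sfB_patterns := (List.mem_filter.1 hck).1
    obtain ⟨j, hj, rfl⟩ := (PySem.List.mem_enumerate_iff _ _ _).1 hcke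
    simp only [sfB_patterns, List.length_cons, List.length_nil] at hj
    interval_cases j <;> simp

/-- a full output ends the emit loop at once. -/
theorem sfB_emit_of_full (ps : List (Int × String)) (counts : List Int) (out : List String)
    (h : 10 ≤ out.length) : sfB_emit ps counts out = out := by
  cases ps with
  | nil => rfl
  | cons p rest => simp only [sfB_emit]; rw [if_pos h]

/-- processing one whole category group in the emit loop: take up to `j` more,
cap the output at 10, and record the new counter value. -/
theorem sfB_emit_group (k : Nat) (g : List String) :
    ∀ (j : Nat), j ≤ 3 → ∀ (counts : List Int), k < counts.length →
      PySem.List.pyGetD counts (k : Int) 0 = 3 - (j : Int) →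
      ∀ (out : List String), out.length ≤ 10 → ∀ (rest : List (Int × String)),
      sfB_emit (g.map (fun f => ((k : Int), f)) ++ rest) counts out
        = sfB_emit rest (PySem.List.pySetD counts (k : Int) ((3 : Int) - ((j - g.length : Nat) : Int)))
            ((out ++ g.take j).take 10) := by
  induction g with
  | nil =>
    intro j hj counts hk hc out hout rest
    simp only [List.map_nil, List.nil_append, List.take_nil, List.append_nil, List.length_nil]
    rw [List.take_of_length_le hout]
    congr 1
    rw [PySem.List.pySetD_natCast]
    rw [PySem.List.pyGetD_natCast] at hc
    have : counts.getD k 0 = counts[k] := List.getD_eq_getElem counts 0 hk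
    rw [this] at hc
    have : ((3 : Int) - ((j - 0 : Nat) : Int)) = counts[k] := by omega
    rw [this, List.set_getElem_self]
  | cons f g' ih =>
    intro j hj counts hk hc out hout rest
    simp only [List.map_cons, List.cons_append, sfB_emit]
    by_cases hfull : 10 ≤ out.length
    · rw [if_pos hfull]
      have hlen : out.length = 10 := by omega
      have htk : (out ++ (f :: g').take j).take 10 = out := by
        rw [List.take_append, List.take_of_length_le (by omega), hlen]
        simp
      rw [htk, sfB_emit_of_full _ _ _ (by omega)]
    · rw [if_neg hfull]
      cases j with
      | zero =>
        rw [if_neg (by rw [hc]; omega)]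
        rw [ih 0 (by omega) counts hk (by simpa using hc) out hout rest]
        simp
      | succ j' =>
        rw [if_pos (by rw [hc]; push_cast; omega)]
        rw [hc]
        have hval : (3 : Int) - ((j' + 1 : Nat) : Int) + 1 = 3 - (j' : Int) := by push_cast; ring
        rw [hval]
        have hlen' : k < (PySem.List.pySetD counts (k : Int) ((3 : Int) - (j' : Int))).length := by
          rw [PySem.List.pySetD_natCast, List.length_set]; exact hk
        have hc' : PySem.List.pyGetD
            (PySem.List.pySetD counts (k : Int) ((3 : Int) - (j' : Int))) (k : Int) 0
              = 3 - (j' : Int) := by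
          rw [PySem.List.pyGetD_pySetD_natCast _ k k _ _ hk, if_pos rfl]
        rw [ih j' (by omega) _ hlen' hc' (out ++ [f]) (by simp; omega) rest]
        congr 1
        · rw [PySem.List.pySetD_natCast, PySem.List.pySetD_natCast, PySem.List.pySetD_natCast,
              List.set_set]
          congr 1
          have : (j' + 1 - (g'.length + 1) : Nat) = (j' - g'.length : Nat) := by omega
          simp [this]
        · rw [List.take_succ_cons]
          simp [List.append_assoc]

/-- the whole emit loop over concatenated groups with fresh counters. -/
theorem sfB_emit_all (gs : List (Nat × List String)) :
    ∀ (counts : List Int) (out : List String), counts.length = 5 → out.length ≤ 10 →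
      (gs.map (fun g => g.1)).Nodup → (∀ g ∈ gs, g.1 < 5) →
      (∀ g ∈ gs, PySem.List.pyGetD counts ((g.1 : Nat) : Int) 0 = 0) →
      sfB_emit (gs.flatMap (fun g => g.2.map (fun f => ((g.1 : Int), f)))) counts out
        = gs.foldl (fun o g => (o ++ g.2.take 3).take 10) out := by
  induction gs with
  | nil => intro counts out _ _ _ _ _; rfl
  | cons g gs ih =>
    intro counts out hlen hout hnd hlt hc0
    simp only [List.flatMap_cons] at *
    have hg5 : g.1 < 5 := hlt g (by simp)
    have hnd2 : g.1 ∉ gs.map (fun g => g.1) ∧ (gs.map (fun g => g.1)).Nodup := by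
      rw [List.map_cons, List.nodup_cons] at hnd; exact hnd
    rw [sfB_emit_group g.1 g.2 3 (by omega) counts (by omega)
          (by simp [hc0 g (by simp)]) out hout _]
    rw [List.foldl_cons]
    apply ih
    · rw [PySem.List.pySetD_natCast, List.length_set]; exact hlen
    · simp [List.length_take]
    · exact hnd2.2
    · intro g' hg'; exact hlt g' (by simp [hg'])
    · intro g' hg'
      have hne : g'.1 ≠ g.1 := by
        intro h
        apply hnd2.1
        rw [← h]
        exact List.mem_map.2 ⟨g', hg', rfl⟩
      rw [PySem.List.pyGetD_pySetD_natCast _ g.1 g'.1 _ _ (by omega)]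
      rw [if_neg hne]
      exact hc0 g' (by simp [hg'])

/-- collapsing the running 10-cap: capping a capped prefix is capping the whole. -/
theorem sf_take10_append (x y : List String) :
    ((x.take 10) ++ y).take 10 = (x ++ y).take 10 := by
  have h1 : min 10 10 = 10 := by omega
  have h2 : 10 - min 10 x.length = 10 - x.length := by omega
  rw [List.take_append, List.take_append, List.take_take, List.length_take, h1, h2]

-- ===== VERDICT (by name: the statement is the Claim_ definition above) =====
theorem suggest_related_files_spec : Claim_equal_suggest_related_files := by
  intro root_dir selected_files _
  unfold Spec_suggest_related_files suggest_related_files suggest_related_files_alt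
  have hnd : ((PySem.Dict.ofList selected_files).items.map (fun p => p.1)).Nodup :=
    PySem.Dict.nodup_keys_ofList selected_files
  have hslice3 : ∀ xs : List String, PySem.List.slice xs none (some 3) = xs.take 3 := by
    intro xs
    rw [show (3 : Int) = ((3 : Nat) : Int) by norm_num, PySem.List.slice_to_natCast]
  have hslice10 : ∀ xs : List String, PySem.List.slice xs none (some 10) = xs.take 10 := by
    intro xs
    rw [show (10 : Int) = ((10 : Nat) : Int) by norm_num, PySem.List.slice_to_natCast]
  set L := (PySem.Dict.ofList selected_files).items with hL
  -- A's value: the concatenation of the per-category take-3 lists, capped at 10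
  simp only [PySem.Dict.keys, hslice10]
  rw [PySem.List.foldl_congr_mem
    (g := fun s ckw => s ++ (sfCat L ckw.2).take 3)
    (h := by
      intro acc ckw _
      rw [sfA_inner L hnd ckw.2, hslice3]
      by_cases h : sfCat L ckw.2 = [] <;> simp [h])]
  rw [PySem.List.foldl_append_eq_flatMap]
  -- B's value: sort the pairs, emit groups
  rw [sfB_pairs_eq L]
  rw [sf_sorted_groups [0, 1, 2, 3, 4] (by decide) (sfPairs L) (sf_pairs_keys L)]
  have hflt : ∀ (k : Int) (kws : List String), (k, kws) ∈ PySem.List.enumerate sfB_patterns →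
      (sfPairs L).filter (fun p => decide (p.1 = k)) = (sfCat L kws).map (fun f => (k, f)) :=
    fun k kws h => sf_filter_pairs L k kws h
  rw [show ([0, 1, 2, 3, 4] : List Int).flatMap (fun k => (sfPairs L).filter (fun p => decide (p.1 = k)))
      = ([(0, sfCat L sfB_patterns[0]), (1, sfCat L sfB_patterns[1]), (2, sfCat L sfB_patterns[2]),
          (3, sfCat L sfB_patterns[3]), (4, sfCat L sfB_patterns[4])] : List (Nat × List String)).flatMap
          (fun g => g.2.map (fun f => ((g.1 : Int), f))) from by
    simp only [List.flatMap_cons, List.flatMap_nil]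
    rw [hflt 0 sfB_patterns[0] (by decide), hflt 1 sfB_patterns[1] (by decide),
        hflt 2 sfB_patterns[2] (by decide), hflt 3 sfB_patterns[3] (by decide),
        hflt 4 sfB_patterns[4] (by decide)]
    norm_num]
  rw [sfB_emit_all
      ([(0, sfCat L sfB_patterns[0]), (1, sfCat L sfB_patterns[1]), (2, sfCat L sfB_patterns[2]),
        (3, sfCat L sfB_patterns[3]), (4, sfCat L sfB_patterns[4])])
      _ [] (by decide) (by simp) (by simp)
      (by intro g hg; fin_cases hg <;> norm_num)
      (by intro g hg; fin_cases hg <;> rfl)]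
  · -- both sides are now take-10 of the same five take-3 blocks
    simp only [List.foldl_cons, List.foldl_nil, List.nil_append, List.flatMap_cons,
      List.flatMap_nil, sfA_patterns]
    simp only [List.append_assoc, sf_take10_append]
    simp [sfB_patterns]
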